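-- pv_equiv track=rewrite | github.com/lbrown97/genai-delivery-assistant | app/rag/ingest.py | _matches_replaced_source
-- ===== SOURCE A (Python) =====
-- def _matches_replaced_source(
--     source_id: str | None,
--     source_path: str | None,
--     target_paths: set[str],
-- ) -> bool:
--     """Return whether a stored point belongs to a source path being replaced."""
--
--     if source_path and source_path in target_paths:
--         return True
--     if not source_id:
--         return False
--     if source_id in target_paths:
--         return True
--     return any(source_id.startswith(f"{path}#p") for path in target_paths)
-- ===== SOURCE B (Python) =====
-- def _matches_replaced_source(
--     source_id,
--     source_path,
--     target_paths,
-- ):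
--     """Return whether a stored point belongs to a source path being replaced.
--
--     Build the list of candidate keys once -- the source_path, the source_id,
--     and every prefix of source_id that precedes a "#p" marker -- then answer
--     with one membership pass over that list.
--     """
--     candidates = []
--     if source_path:
--         candidates.append(source_path)
--     if source_id:
--         candidates.append(source_id)
--         for i in range(len(source_id) - 1):
--             if source_id[i] == '#' and source_id[i + 1] == 'p':
--                 candidates.append(source_id[:i])
--     return any(c in target_paths for c in candidates)
-- ===== Notes on version B (the rewrite author's own statement) =====
-- stated objective: alternative
-- what changed: A tests every target path as a '<path>#p' prefix of source_id (a scan per target); B instead builds a candidate-key list once -- source_path, source_id, and the prefix before each '#p' marker found in one scan of source_id -- and answers with a single membership pass over those candidates.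
import Mathlib
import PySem

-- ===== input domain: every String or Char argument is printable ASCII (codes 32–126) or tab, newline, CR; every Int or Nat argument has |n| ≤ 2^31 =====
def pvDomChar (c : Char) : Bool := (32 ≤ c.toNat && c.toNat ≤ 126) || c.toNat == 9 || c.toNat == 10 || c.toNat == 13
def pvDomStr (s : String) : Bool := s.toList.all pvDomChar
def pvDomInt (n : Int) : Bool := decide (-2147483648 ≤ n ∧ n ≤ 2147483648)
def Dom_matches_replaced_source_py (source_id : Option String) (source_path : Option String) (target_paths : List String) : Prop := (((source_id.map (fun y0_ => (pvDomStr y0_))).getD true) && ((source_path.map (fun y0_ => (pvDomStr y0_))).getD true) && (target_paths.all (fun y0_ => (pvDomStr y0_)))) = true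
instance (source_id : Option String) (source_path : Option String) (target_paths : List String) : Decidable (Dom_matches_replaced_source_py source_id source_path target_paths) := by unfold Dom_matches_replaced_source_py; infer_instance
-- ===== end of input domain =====

-- B replaces A's per-target-path prefix test by building the candidate keys once (source_path,
-- source_id, and the prefix before each '#p' marker in source_id) and doing one membership pass
-- (objective: alternative algorithm, same result).

-- ===== PORT A =====
def matches_replaced_source_py (source_id : Option String) (source_path : Option String) (target_paths : List String) : Bool :=
  if (match source_path with
      | some sp => !(sp == "") && target_paths.contains sp
      | none => false) then true
  else
    match source_id with
    | none => false
    | some sid =>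
      if sid == "" then false
      else if target_paths.contains sid then true
      else target_paths.any (fun path => PySem.Str.startswith sid (path ++ "#p"))

-- ===== PORT B =====
-- the candidate list Source B accumulates: source_path (if truthy), then source_id (if truthy)
-- followed by the prefix before each '#p' marker position of source_id
def pvMarkerPrefixes (sid : String) : List String :=
  (PySem.List.pyRange 0 (PySem.Str.len sid - 1) 1).filterMap (fun i =>
    if (PySem.Str.pyGet? sid i == some '#') && (PySem.Str.pyGet? sid (i + 1) == some 'p')
    then some (PySem.Str.slice sid none (some i)) else none)

def pvCandidates (source_id : Option String) (source_path : Option String) : List String :=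
  (match source_path with
   | some sp => if sp == "" then [] else [sp]
   | none => []) ++
  (match source_id with
   | none => []
   | some sid =>
     if sid == "" then [] else sid :: pvMarkerPrefixes sid)

def matches_replaced_source_py_alt (source_id : Option String) (source_path : Option String) (target_paths : List String) : Bool :=
  (pvCandidates source_id source_path).any (fun c => target_paths.contains c)

-- ===== PRECONDITION & SPEC =====
def Spec_matches_replaced_source_py (source_id : Option String) (source_path : Option String) (target_paths : List String) (out : Bool) : Prop := out = matches_replaced_source_py_alt source_id source_path target_paths
instance (source_id : Option String) (source_path : Option String) (target_paths : List String) (out : Bool) : Decidable (Spec_matches_replaced_source_py source_id source_path target_paths out) := by unfold Spec_matches_replaced_source_py; infer_instance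

-- ===== CLAIM (what is proved, stated in full; the proofs are below) =====
def Claim_equal_matches_replaced_source_py : Prop := ∀ (source_id : Option String) (source_path : Option String) (target_paths : List String), Dom_matches_replaced_source_py source_id source_path target_paths → Spec_matches_replaced_source_py source_id source_path target_paths (matches_replaced_source_py source_id source_path target_paths)

-- ===== LEMMAS AND PROOFS =====

theorem pv_string_eq_iff_toList (s t : String) : s = t ↔ s.toList = t.toList := by
  constructor
  · intro h; rw [h]
  · intro h
    have h2 := congrArg String.ofList h
    simpa using h2

-- the heart: "some target path followed by '#p' is a prefix of sid" equals
-- "the prefix before some '#p' marker position of sid is a target path"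
theorem pv_any_prefix_eq_any_marker (sid : String) (targets : List String) :
    targets.any (fun path => PySem.Str.startswith sid (path ++ "#p")) =
      (pvMarkerPrefixes sid).any (fun c => targets.contains c) := by
  rw [Bool.eq_iff_iff, List.any_eq_true, List.any_eq_true]
  unfold pvMarkerPrefixes
  constructor
  · rintro ⟨p, hp, hpre⟩
    rw [PySem.Str.startswith_eq, PySem.Chars.startswith_iff] at hpre
    have hsplit : p.toList ++ ['#', 'p'] <+: sid.toList := by
      simpa [show ("#p" : String).toList = ['#', 'p'] from rfl] using hpre
    obtain ⟨t, ht⟩ := hsplit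
    have hlen : sid.toList.length = p.toList.length + (2 + t.length) := by
      rw [← ht]; simp; omega
    have hslice : PySem.Str.slice sid none (some ((p.toList.length : Int))) = p := by
      rw [pv_string_eq_iff_toList, PySem.Str.toList_slice, PySem.Chars.slice_eq_listSlice,
          PySem.List.slice_to sid.toList (Int.natCast_nonneg _), Int.toNat_natCast, ← ht]
      rw [show p.toList ++ ['#', 'p'] ++ t = p.toList ++ (['#', 'p'] ++ t) by simp,
          List.take_left]
    refine ⟨PySem.Str.slice sid none (some ((p.toList.length : Int))), ?_, ?_⟩
    · rw [List.mem_filterMap]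
      refine ⟨(p.toList.length : Int), ?_, ?_⟩
      · rw [PySem.List.mem_pyRange_one, PySem.Str.len_eq]
        exact ⟨Int.natCast_nonneg _, by omega⟩
      · have hg1 : PySem.Str.pyGet? sid (p.toList.length : Int) = some '#' := by
          rw [PySem.Str.pyGet?_natCast, ← ht]
          rw [show p.toList ++ ['#', 'p'] ++ t = p.toList ++ (['#', 'p'] ++ t) by simp]
          rw [List.getElem?_append_right (le_refl _)]
          simp
        have hg2 : PySem.Str.pyGet? sid ((p.toList.length : Int) + 1) = some 'p' := by
          have hcast : ((p.toList.length : Int) + 1) = ((p.toList.length + 1 : Nat) : Int) := by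
            push_cast; ring
          rw [hcast, PySem.Str.pyGet?_natCast, ← ht]
          rw [show p.toList ++ ['#', 'p'] ++ t = p.toList ++ (['#', 'p'] ++ t) by simp]
          rw [List.getElem?_append_right (by omega)]
          simp
        rw [hg1, hg2]; simp
    · rw [hslice]; simpa using hp
  · rintro ⟨c, hcmem, hcT⟩
    rw [List.mem_filterMap] at hcmem
    obtain ⟨i, hirange, hfi⟩ := hcmem
    rw [PySem.List.mem_pyRange_one, PySem.Str.len_eq] at hirange
    obtain ⟨h0, hlt⟩ := hirange
    by_cases hcond : (PySem.Str.pyGet? sid i == some '#') && (PySem.Str.pyGet? sid (i + 1) == some 'p')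
    · rw [if_pos hcond, Option.some_inj] at hfi
      rw [Bool.and_eq_true, beq_iff_eq, beq_iff_eq] at hcond
      obtain ⟨hg1, hg2⟩ := hcond
      have hi : i = ((i.toNat : Nat) : Int) := by omega
      rw [hi, PySem.Str.pyGet?_natCast] at hg1
      have hcast : i + 1 = ((i.toNat + 1 : Nat) : Int) := by omega
      rw [hcast, PySem.Str.pyGet?_natCast] at hg2
      have hlen1 : i.toNat < sid.toList.length := by omega
      have hlen2 : i.toNat + 1 < sid.toList.length := by omega
      refine ⟨c, by simpa using hcT, ?_⟩
      rw [PySem.Str.startswith_eq, PySem.Chars.startswith_iff]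
      have hcL : (c ++ "#p").toList = sid.toList.take i.toNat ++ ['#', 'p'] := by
        rw [← hfi]
        simp [PySem.Str.toList_slice, PySem.Chars.slice_eq_listSlice,
          PySem.List.slice_to sid.toList h0]
      rw [hcL]
      refine ⟨sid.toList.drop (i.toNat + 2), ?_⟩
      have hdec : sid.toList.drop i.toNat
          = ['#', 'p'] ++ sid.toList.drop (i.toNat + 2) := by
        have e1 : sid.toList[i.toNat] = '#' := by
          have := hg1; rwa [List.getElem?_eq_getElem hlen1, Option.some_inj] at this
        have e2 : sid.toList[i.toNat + 1] = 'p' := by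
          have := hg2; rwa [List.getElem?_eq_getElem hlen2, Option.some_inj] at this
        rw [List.drop_eq_getElem_cons hlen1, e1,
            show i.toNat + 1 = i.toNat + 1 from rfl,
            List.drop_eq_getElem_cons hlen2, e2]
        rfl
      calc sid.toList.take i.toNat ++ ['#', 'p'] ++ sid.toList.drop (i.toNat + 2)
          = sid.toList.take i.toNat ++ (['#', 'p'] ++ sid.toList.drop (i.toNat + 2)) := by simp
        _ = sid.toList.take i.toNat ++ sid.toList.drop i.toNat := by rw [← hdec]
        _ = sid.toList := List.take_append_drop _ _
    · rw [if_neg hcond] at hfi; exact absurd hfi (by simp)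

theorem pv_key (sid : String) (targets : List String) :
    (targets.any fun path => PySem.Chars.startswith sid.toList (path.toList ++ ['#', 'p'])) =
      ((pvMarkerPrefixes sid).any fun c => decide (c ∈ targets)) := by
  have h := pv_any_prefix_eq_any_marker sid targets
  simpa using h

-- ===== VERDICT (by name: the statement is the Claim_ definition above) =====
theorem matches_replaced_source_py_spec : Claim_equal_matches_replaced_source_py := by
  intro source_id source_path target_paths _
  unfold Spec_matches_replaced_source_py matches_replaced_source_py matches_replaced_source_py_alt
    pvCandidates
  rw [List.any_append]
  match source_path, source_id with
  | none, none => simp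
  | none, some sid =>
    by_cases hsid : sid = ""
    · simp [hsid]
    · simp [hsid]
      rw [pv_key]
  | some sp, none =>
    by_cases hsp : sp = ""
    · simp [hsp]
    · simp [hsp]
  | some sp, some sid =>
    by_cases hsid : sid = "" <;> by_cases hsp : sp = "" <;> simp [hsp, hsid] <;> rw [pv_key]
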